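-- pv_equiv track=rewrite | github.com/llfz666/MODULAR-RAG-MCP-SERVER | tests/fixtures/generate_golden_test_set.py | get_sample_chunk_ids_for_query
-- ===== SOURCE A (Python) =====
-- def get_sample_chunk_ids_for_query(query: str, all_chunks: list, top_k: int = 5) -> list:
--     """Get expected chunk IDs for a query based on content matching.
--
--     This is a helper to manually curate expected chunk IDs by examining
--     chunk content. In production, these would come from annotated data.
--     """
--     # Simple keyword matching to find relevant chunks
--     query_words = query.lower().split()
--     scored_chunks = []
--
--     for chunk in all_chunks:
--         chunk_text = chunk.get('text', chunk.get('content', '')).lower()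
--         score = sum(1 for word in query_words if word in chunk_text)
--         if score > 0:
--             chunk_id = chunk.get('id', chunk.get('chunk_id', ''))
--             scored_chunks.append((chunk_id, score))
--
--     # Sort by score and return top chunk IDs
--     scored_chunks.sort(key=lambda x: x[1], reverse=True)
--     return [chunk_id for chunk_id, _ in scored_chunks[:top_k]]
-- ===== SOURCE B (Python) =====
-- def get_sample_chunk_ids_for_query(query: str, all_chunks: list, top_k: int = 5) -> list:
--     """Score every chunk once, then emit ids level-by-level from the highest
--     possible score down to 1 with one equality scan per level (no sort)."""
--     words = query.lower().split()
--     scored = [(_field(c, 'id', 'chunk_id'), _score(words, c)) for c in all_chunks]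
--     out = []
--     for level in range(len(words), 0, -1):
--         out += [cid for cid, sc in scored if sc == level]
--     return out[:top_k]
--
--
-- def _field(chunk, primary, fallback):
--     return chunk[primary] if primary in chunk else chunk.get(fallback, '')
--
--
-- def _score(words, chunk):
--     text = _field(chunk, 'text', 'content').lower()
--     return len([w for w in words if w in text])
-- ===== Notes on version B (the rewrite author's own statement) =====
-- stated objective: alternative
-- what changed: Replaces A's conditional-append pass plus stable comparison sort with a scoring map followed by per-score-level equality scans: ids are emitted by scanning the scored list once for each score from len(query_words) down to 1, which yields the stable descending order without any sort.
import Mathlib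
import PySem

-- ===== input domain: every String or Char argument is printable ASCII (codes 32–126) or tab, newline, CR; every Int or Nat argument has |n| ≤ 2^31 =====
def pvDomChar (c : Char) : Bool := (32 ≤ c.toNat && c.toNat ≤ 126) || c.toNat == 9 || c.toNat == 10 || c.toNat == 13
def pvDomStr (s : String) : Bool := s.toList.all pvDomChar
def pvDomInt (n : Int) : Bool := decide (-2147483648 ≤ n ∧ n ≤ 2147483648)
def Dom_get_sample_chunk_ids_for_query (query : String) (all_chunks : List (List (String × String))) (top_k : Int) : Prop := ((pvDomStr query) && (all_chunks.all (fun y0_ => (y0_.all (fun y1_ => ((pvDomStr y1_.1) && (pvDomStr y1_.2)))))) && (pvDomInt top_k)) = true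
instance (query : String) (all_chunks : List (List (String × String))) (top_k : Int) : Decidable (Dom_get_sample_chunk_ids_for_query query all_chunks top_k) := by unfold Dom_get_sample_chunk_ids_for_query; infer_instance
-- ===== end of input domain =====

-- B replaces A's conditional-append pass + stable comparison sort with one scoring map and
-- per-score-level equality scans, highest level first (same return value; objective: alternative).

-- ===== PORT A =====
-- Python dict.get(k, dflt) on an insertion-ordered association list (first match).
def pvGet (d : List (String × String)) (k dflt : String) : String :=
  match d.find? (fun p => p.1 == k) with
  | some p => p.2
  | none => dflt

def get_sample_chunk_ids_for_query (query : String) (all_chunks : List (List (String × String))) (top_k : Int) : List String :=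
  let query_words := PySem.Str.split₀ (PySem.Str.lower query)
  let scored_chunks := all_chunks.foldl (fun acc chunk =>
    let chunk_text := PySem.Str.lower (pvGet chunk "text" (pvGet chunk "content" ""))
    let score : Int := query_words.foldl (fun s word => if PySem.Str.isIn word chunk_text then s + 1 else s) 0
    if 0 < score then
      acc ++ [(pvGet chunk "id" (pvGet chunk "chunk_id" ""), score)]
    else acc) []
  let sorted_chunks := PySem.List.sorted scored_chunks (fun x => x.2) true
  (PySem.List.slice sorted_chunks none (some top_k)).map (fun x => x.1)

-- ===== PORT B =====
-- _field: chunk[primary] if primary in chunk else chunk.get(fallback, '') (first match).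
def pvLookup : List (String × String) → String → Option String
  | [], _ => none
  | (k, v) :: rest, key => if k == key then some v else pvLookup rest key

def pvField (chunk : List (String × String)) (primary fallback : String) : String :=
  match pvLookup chunk primary with
  | some v => v
  | none => (pvLookup chunk fallback).getD ""

-- _score: len([w for w in words if w in text]) with text = _field(chunk,'text','content').lower()
def pvScore (words : List String) (chunk : List (String × String)) : Int :=
  ((words.filter (fun w =>
      PySem.Str.isIn w (PySem.Str.lower (pvField chunk "text" "content")))).length : Int)

def get_sample_chunk_ids_for_query_alt (query : String) (all_chunks : List (List (String × String))) (top_k : Int) : List String :=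
  let words := PySem.Str.split₀ (PySem.Str.lower query)
  let scored := all_chunks.map (fun c => (pvField c "id" "chunk_id", pvScore words c))
  let out := (PySem.List.pyRange (words.length : Int) 0 (-1)).foldl
    (fun acc level => acc ++ (scored.filter (fun p => p.2 == level)).map (fun p => p.1)) []
  PySem.List.slice out none (some top_k)

-- ===== PRECONDITION & SPEC =====
def Spec_get_sample_chunk_ids_for_query (query : String) (all_chunks : List (List (String × String))) (top_k : Int) (out : List String) : Prop := out = get_sample_chunk_ids_for_query_alt query all_chunks top_k
instance (query : String) (all_chunks : List (List (String × String))) (top_k : Int) (out : List String) : Decidable (Spec_get_sample_chunk_ids_for_query query all_chunks top_k out) := by unfold Spec_get_sample_chunk_ids_for_query; infer_instance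

-- ===== CLAIM (what is proved, stated in full; the proofs are below) =====
def Claim_equal_get_sample_chunk_ids_for_query : Prop := ∀ (query : String) (all_chunks : List (List (String × String))) (top_k : Int), Dom_get_sample_chunk_ids_for_query query all_chunks top_k → Spec_get_sample_chunk_ids_for_query query all_chunks top_k (get_sample_chunk_ids_for_query query all_chunks top_k)

-- ===== LEMMAS AND PROOFS =====

-- A's dict.get nesting equals B's _field helper.
theorem pv_lookup_find (c : List (String × String)) (k : String) :
    pvLookup c k = (c.find? (fun p => p.1 == k)).map (fun p => p.2) := by
  induction c with
  | nil => rfl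
  | cons p rest ih =>
    obtain ⟨a, b⟩ := p
    by_cases h : a == k
    · simp [pvLookup, List.find?, h]
    · simp only [pvLookup, List.find?] at *
      simp [h, ih]

theorem pv_field_eq (c : List (String × String)) (k1 k2 : String) :
    pvGet c k1 (pvGet c k2 "") = pvField c k1 k2 := by
  unfold pvGet pvField
  rw [pv_lookup_find, pv_lookup_find]
  cases c.find? (fun p => p.1 == k1) <;> cases c.find? (fun p => p.1 == k2) <;> simp

-- A's counting foldl equals B's filter-length score.
theorem pv_count_aux (words : List String) (t : String) (init : Int) :
    words.foldl (fun s word => if PySem.Str.isIn word t then s + 1 else s) init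
      = init + ((words.filter (fun w => PySem.Str.isIn w t)).length : Int) := by
  induction words generalizing init with
  | nil => simp
  | cons w words ih =>
    simp only [List.foldl_cons, List.filter_cons]
    by_cases h : PySem.Str.isIn w t = true
    · rw [if_pos h, ih, if_pos h]; simp; ring
    · rw [if_neg h, ih, if_neg h]

theorem pv_count_eq (words : List String) (t : String) :
    words.foldl (fun s word => if PySem.Str.isIn word t then s + 1 else s) 0
      = ((words.filter (fun w => PySem.Str.isIn w t)).length : Int) := by
  rw [pv_count_aux]; ring

-- Taking a prefix (any Python xs[:b]) commutes with List.map.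
theorem pv_slice_map {α β : Type} (f : α → β) (xs : List α) (b : Int) :
    PySem.List.slice (xs.map f) none (some b) = (PySem.List.slice xs none (some b)).map f := by
  by_cases hb : 0 ≤ b
  · rw [PySem.List.slice_to _ hb, PySem.List.slice_to _ hb, List.map_take]
  · have hk : 0 < b.natAbs := by omega
    have hb' : b = -(b.natAbs : Int) := by omega
    rw [hb', PySem.List.slice_to_neg_natCast _ _ hk, PySem.List.slice_to_neg_natCast _ _ hk,
      List.map_take, List.length_map]

-- insertBy walks past a block it is not 'before' any element of.
theorem pv_insertBy_all_false {α : Type} (bef : α → α → Bool) (x : α) (g t : List α)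
    (h : ∀ y ∈ g, bef x y = false) :
    PySem.List.insertBy bef x (g ++ t) = g ++ PySem.List.insertBy bef x t := by
  induction g with
  | nil => simp
  | cons y g ih =>
    simp only [List.cons_append, PySem.List.insertBy, h y (by simp)]
    simp only [Bool.false_eq_true, if_false, List.cons.injEq, true_and]
    exact ih (fun z hz => h z (by simp [hz]))

-- insertBy stops immediately when it is 'before' everything.
theorem pv_insertBy_all_true {α : Type} (bef : α → α → Bool) (x : α) (t : List α)
    (h : ∀ y ∈ t, bef x y = true) :
    PySem.List.insertBy bef x t = x :: t := by
  cases t with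
  | nil => rfl
  | cons y t => simp [PySem.List.insertBy, h y (by simp)]

-- Inserting x into the score-grouped arrangement of l appends it at the end of its own score group.
theorem pv_insertBy_flat (scores : List Int) (hp : scores.Pairwise (· > ·))
    (x : String × Int) (hx : x.2 ∈ scores) (l : List (String × Int)) :
    PySem.List.insertBy (fun a b => decide (b.2 < a.2)) x
      (scores.flatMap (fun s => l.filter (fun p => decide (p.2 = s))))
    = scores.flatMap (fun s => (l ++ [x]).filter (fun p => decide (p.2 = s))) := by
  induction scores with
  | nil => cases hx
  | cons s rest ih =>
    have hrest : ∀ r ∈ rest, r < s := fun r hr => List.rel_of_pairwise_cons hp hr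
    have hpr : rest.Pairwise (· > ·) := hp.of_cons
    simp only [List.flatMap_cons]
    by_cases hxs : x.2 = s
    · have h1 : ∀ y ∈ l.filter (fun p => decide (p.2 = s)), (fun a b => decide (b.2 < a.2)) x y = false := by
        intro y hy
        have := (List.mem_filter.mp hy).2
        simp only [decide_eq_true_eq] at this
        simp [this, hxs]
      have h2 : ∀ y ∈ rest.flatMap (fun s => l.filter (fun p => decide (p.2 = s))),
          (fun a b => decide (b.2 < a.2)) x y = true := by
        intro y hy
        obtain ⟨r, hr, hyr⟩ := List.mem_flatMap.mp hy
        have hyv := (List.mem_filter.mp hyr).2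
        simp only [decide_eq_true_eq] at hyv
        have := hrest r hr
        simp only [decide_eq_true_eq]; omega
      have hfl : (l ++ [x]).filter (fun p => decide (p.2 = s))
          = l.filter (fun p => decide (p.2 = s)) ++ [x] := by
        rw [List.filter_append]; simp [hxs]
      have hflat : rest.flatMap (fun r => (l ++ [x]).filter (fun p => decide (p.2 = r)))
          = rest.flatMap (fun r => l.filter (fun p => decide (p.2 = r))) := by
        apply List.flatMap_congr
        intro r hr
        have hne : ¬ (x.2 = r) := by have := hrest r hr; omega
        rw [List.filter_append]; simp [hne]
      rw [pv_insertBy_all_false _ _ _ _ h1, pv_insertBy_all_true _ _ _ h2, hfl, hflat]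
      simp
    · have hxr : x.2 ∈ rest := by
        rcases hx with _ | h
        · exact absurd rfl hxs
        · assumption
      have h1 : ∀ y ∈ l.filter (fun p => decide (p.2 = s)), (fun a b => decide (b.2 < a.2)) x y = false := by
        intro y hy
        have hys := (List.mem_filter.mp hy).2
        simp only [decide_eq_true_eq] at hys
        have : x.2 < s := by have := hrest _ hxr; omega
        simp only [decide_eq_false_iff_not]; omega
      have hfl : (l ++ [x]).filter (fun p => decide (p.2 = s))
          = l.filter (fun p => decide (p.2 = s)) := by
        rw [List.filter_append]; simp [hxs]
      rw [pv_insertBy_all_false _ _ _ _ h1, ih hpr hxr, hfl]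

-- Stable reverse sort by score = concatenation of the score groups, scores strictly decreasing.
theorem pv_sorted_rev_grouped (l : List (String × Int)) (scores : List Int)
    (hp : scores.Pairwise (· > ·)) (hmem : ∀ p ∈ l, p.2 ∈ scores) :
    PySem.List.sorted l (fun x => x.2) true
    = scores.flatMap (fun s => l.filter (fun p => decide (p.2 = s))) := by
  rw [PySem.List.sorted_rev_eq_foldl_insertBy]
  induction l using List.reverseRecOn with
  | nil => simp
  | append_singleton l x ih =>
    rw [List.foldl_append, List.foldl_cons, List.foldl_nil,
      ih (fun p hp' => hmem p (by simp [hp']))]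
    exact pv_insertBy_flat scores hp x (hmem x (by simp)) l

-- A's accumulate-if loop is a filter of the per-chunk (id, score) items.
theorem pv_foldlA_eq {C : Type} (chunks : List C) (idOf : C → String) (scoreOf : C → Int)
    (init : List (String × Int)) :
    chunks.foldl (fun acc c => if 0 < scoreOf c then acc ++ [(idOf c, scoreOf c)] else acc) init
    = init ++ (chunks.map (fun c => (idOf c, scoreOf c))).filter (fun p => decide (0 < p.2)) := by
  induction chunks generalizing init with
  | nil => simp
  | cons c chunks ih =>
    simp only [List.foldl_cons, List.map_cons, List.filter_cons]
    by_cases h : 0 < scoreOf c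
    · simp [h, ih]
    · simp [h, ih]

-- The master equation: A's sort-then-slice equals B's level-by-level scans, for any
-- per-chunk id and score functions with scores bounded by n.
theorem pv_master {C : Type} (chunks : List C) (idOf : C → String) (scoreOf : C → Int)
    (n : Nat) (top_k : Int) (hle : ∀ c ∈ chunks, scoreOf c ≤ (n : Int)) :
    (PySem.List.slice
      (PySem.List.sorted
        (chunks.foldl (fun acc c => if 0 < scoreOf c then acc ++ [(idOf c, scoreOf c)] else acc) [])
        (fun x => x.2) true) none (some top_k)).map (fun x => x.1)
    = PySem.List.slice
        ((PySem.List.pyRange (n : Int) 0 (-1)).foldl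
          (fun acc level => acc ++
            ((chunks.map (fun c => (idOf c, scoreOf c))).filter (fun p => p.2 == level)).map (fun p => p.1)) [])
        none (some top_k) := by
  have hpair : (PySem.List.pyRange (n : Int) 0 (-1)).Pairwise (· > ·) := by
    rw [PySem.List.pyRange_neg_one_eq_reverse, List.pairwise_reverse]
    exact PySem.List.pairwise_lt_pyRange_one 1 ((n : Int) + 1)
  rw [pv_foldlA_eq, List.nil_append,
    pv_sorted_rev_grouped _ (PySem.List.pyRange (n : Int) 0 (-1)) hpair (by
      intro p hp
      have hm := List.mem_filter.mp hp
      obtain ⟨c, hc, hcp⟩ := List.mem_map.mp hm.1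
      have hpos := hm.2
      simp only [decide_eq_true_eq] at hpos
      rw [PySem.List.mem_pyRange_neg_one]
      have h1 := hle c hc
      have h2 : p.2 = scoreOf c := by rw [← hcp]
      omega),
    ← pv_slice_map, List.map_flatMap,
    PySem.List.foldl_append_eq_flatMap, List.nil_append]
  congr 1
  apply List.flatMap_congr
  intro s hs
  rw [List.filter_filter]
  congr 1
  apply List.filter_congr
  intro a _
  have hsr := (PySem.List.mem_pyRange_neg_one).mp hs
  by_cases h : a.2 = s
  · simp [h]; omega
  · simp [h]

-- ===== VERDICT (by name: the statement is the Claim_ definition above) =====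
theorem get_sample_chunk_ids_for_query_spec : Claim_equal_get_sample_chunk_ids_for_query := by
  intro query all_chunks top_k _
  unfold Spec_get_sample_chunk_ids_for_query
  unfold get_sample_chunk_ids_for_query get_sample_chunk_ids_for_query_alt
  simp only [pv_count_eq, pv_field_eq]
  exact pv_master all_chunks
    (fun chunk => pvField chunk "id" "chunk_id")
    (pvScore (PySem.Str.split₀ (PySem.Str.lower query)))
    (PySem.Str.split₀ (PySem.Str.lower query)).length top_k
    (fun c _ => by
      unfold pvScore
      exact_mod_cast List.length_filter_le _ _)
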